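-- pv_equiv track=rewrite | github.com/Sheko1/SoftUni | Python-Advanced/Multidimensional-Lists/Exercise/08_miner.py | player_start_and_coal_counter
-- ===== SOURCE A (Python) =====
-- def player_start_and_coal_counter(matrix_1):
--     player_start = None
--     coal_counter = 0
--
--     for r in range(len(matrix_1)):
--         for c in range(len(matrix_1[r])):
--             if matrix_1[r][c] == "s":
--                 player_start = (r, c)
--
--             elif matrix_1[r][c] == "c":
--                 coal_counter += 1
--
--     return player_start, coal_counter
-- ===== SOURCE B (Python) =====
-- def player_start_and_coal_counter(matrix_1):
--     cells = [(cell, (r, c)) for r, row in enumerate(matrix_1) for c, cell in enumerate(row)]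
--     coal_counter = sum(1 for cell, _ in cells if cell == "c")
--     player_start = next((pos for cell, pos in reversed(cells) if cell == "s"), None)
--     return player_start, coal_counter
-- ===== Notes on version B (the rewrite author's own statement) =====
-- stated objective: alternative
-- what changed: B flattens the grid once into a coordinate-tagged cell list, counts coal on that flat list, and finds the last 's' as the first match of a reversed search with early stop, instead of A's single interleaved nested index loop that overwrites the position and increments the counter in place.
import Mathlib
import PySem

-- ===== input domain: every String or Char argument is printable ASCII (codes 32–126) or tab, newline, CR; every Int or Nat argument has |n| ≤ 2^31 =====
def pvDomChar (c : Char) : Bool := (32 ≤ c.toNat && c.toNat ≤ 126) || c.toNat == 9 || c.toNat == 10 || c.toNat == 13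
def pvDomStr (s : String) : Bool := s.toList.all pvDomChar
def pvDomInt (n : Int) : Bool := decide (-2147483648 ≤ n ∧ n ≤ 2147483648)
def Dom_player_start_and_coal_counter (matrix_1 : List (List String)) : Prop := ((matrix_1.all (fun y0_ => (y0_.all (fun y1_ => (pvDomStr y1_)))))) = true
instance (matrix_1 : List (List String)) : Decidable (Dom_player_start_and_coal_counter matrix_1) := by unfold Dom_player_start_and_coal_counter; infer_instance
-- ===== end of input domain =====

-- B flattens the grid once into a coordinate-tagged cell list, counts coal on that list, and finds the
-- last 's' as the FIRST match of a reversed search (early stop) instead of A's keep-last overwrite in a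
-- nested index loop (objective: alternative decomposition).

-- ===== PORT A =====
def player_start_and_coal_counter (matrix_1 : List (List String)) : (Option (Int × Int)) × Int :=
  (PySem.List.pyRange 0 (matrix_1.length : Int) 1).foldl (fun st r =>
    (PySem.List.pyRange 0 ((PySem.List.pyGetD matrix_1 r []).length : Int) 1).foldl (fun st2 c =>
      if PySem.List.pyGetD (PySem.List.pyGetD matrix_1 r []) c "" = "s" then (some (r, c), st2.2)
      else if PySem.List.pyGetD (PySem.List.pyGetD matrix_1 r []) c "" = "c" then (st2.1, st2.2 + 1)
      else st2) st) ((none : Option (Int × Int)), (0 : Int))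

-- ===== PORT B =====
def player_start_and_coal_counter_alt (matrix_1 : List (List String)) : (Option (Int × Int)) × Int :=
  let cells : List (String × (Int × Int)) :=
    (PySem.List.enumerate matrix_1 0).flatMap (fun rrow =>
      (PySem.List.enumerate rrow.2 0).map (fun ccell => (ccell.2, (rrow.1, ccell.1))))
  let coal_counter : Int := (cells.countP (fun p => p.1 == "c") : Int)
  let player_start : Option (Int × Int) :=
    (cells.reverse.find? (fun p => p.1 == "s")).map Prod.snd
  (player_start, coal_counter)

-- ===== PRECONDITION & SPEC =====
def Spec_player_start_and_coal_counter (matrix_1 : List (List String)) (out : (Option (Int × Int)) × Int) : Prop := out = player_start_and_coal_counter_alt matrix_1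
instance (matrix_1 : List (List String)) (out : (Option (Int × Int)) × Int) : Decidable (Spec_player_start_and_coal_counter matrix_1 out) := by unfold Spec_player_start_and_coal_counter; infer_instance

-- ===== CLAIM (what is proved, stated in full; the proofs are below) =====
def Claim_equal_player_start_and_coal_counter : Prop := ∀ (matrix_1 : List (List String)), Dom_player_start_and_coal_counter matrix_1 → Spec_player_start_and_coal_counter matrix_1 (player_start_and_coal_counter matrix_1)

-- ===== LEMMAS AND PROOFS =====

-- A's inner-loop body, on (index, cell) pairs
def pvInnerA (r : Int) (st2 : (Option (Int × Int)) × Int) (p : Int × String) : (Option (Int × Int)) × Int :=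
  if p.2 = "s" then (some (r, p.1), st2.2) else if p.2 = "c" then (st2.1, st2.2 + 1) else st2

-- B's cell list
def pvCells (matrix_1 : List (List String)) : List (String × (Int × Int)) :=
  (PySem.List.enumerate matrix_1 0).flatMap (fun rrow =>
    (PySem.List.enumerate rrow.2 0).map (fun ccell => (ccell.2, (rrow.1, ccell.1))))

-- B's keep-last-as-reverse-find step
def pvStep (ps : Option (Int × Int)) (q : String × (Int × Int)) : Option (Int × Int) :=
  if q.1 = "s" then some q.2 else ps

theorem pvInnerA_split (r : Int) (l : List (Int × String)) : ∀ ps cc,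
    l.foldl (pvInnerA r) (ps, cc)
      = ((l.map (fun ccell => ((ccell.2, (r, ccell.1)) : String × (Int × Int)))).foldl pvStep ps,
         cc + ((l.map (fun ccell => ((ccell.2, (r, ccell.1)) : String × (Int × Int)))).countP (fun p => p.1 == "c") : Int)) := by
  induction l with
  | nil => intro ps cc; simp
  | cons p t ih =>
    intro ps cc
    simp only [List.foldl_cons, List.map_cons, List.countP_cons, pvInnerA, pvStep]
    by_cases h1 : p.2 = "s"
    · have h2 : ¬ p.2 = "c" := by rw [h1]; decide
      simp [h1, ih]
    · by_cases h2 : p.2 = "c"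
      · simp only [h2, if_true, ih]
        simp
        omega
      · simp [h1, h2, ih]

theorem pvInnerA_eq (r : Int) (matrix_1 : List (List String)) (st : (Option (Int × Int)) × Int) :
    (PySem.List.pyRange 0 ((PySem.List.pyGetD matrix_1 r []).length : Int) 1).foldl (fun st2 c =>
      if PySem.List.pyGetD (PySem.List.pyGetD matrix_1 r []) c "" = "s" then (some (r, c), st2.2)
      else if PySem.List.pyGetD (PySem.List.pyGetD matrix_1 r []) c "" = "c" then (st2.1, st2.2 + 1)
      else st2) st
    = (PySem.List.enumerate (PySem.List.pyGetD matrix_1 r []) 0).foldl (pvInnerA r) st := by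
  rw [PySem.List.enumerate_eq_map_pyRange (d := ""), List.foldl_map]
  rfl

theorem pvOuter_split (l : List (Int × List String)) : ∀ ps cc,
    l.foldl (fun st rrow => (PySem.List.enumerate rrow.2 0).foldl (pvInnerA rrow.1) st) (ps, cc)
      = ((l.flatMap (fun rrow => (PySem.List.enumerate rrow.2 0).map
            (fun ccell => ((ccell.2, (rrow.1, ccell.1)) : String × (Int × Int))))).foldl pvStep ps,
         cc + ((l.flatMap (fun rrow => (PySem.List.enumerate rrow.2 0).map
            (fun ccell => ((ccell.2, (rrow.1, ccell.1)) : String × (Int × Int))))).countP (fun p => p.1 == "c") : Int)) := by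
  induction l with
  | nil => intro ps cc; simp
  | cons q t ih =>
    intro ps cc
    simp only [List.foldl_cons, List.flatMap_cons, List.countP_append, List.foldl_append]
    rw [pvInnerA_split, ih]
    simp only [Prod.mk.injEq]
    exact ⟨trivial, by push_cast; ring⟩

-- keep-last forward fold = first match of the reversed list (with fallback)
theorem pvFoldl_keepLast (l : List (String × (Int × Int))) : ∀ ps,
    l.foldl pvStep ps
      = (match l.reverse.find? (fun p => p.1 == "s") with
         | some x => some x.2
         | none => ps) := by
  induction l with
  | nil => intro ps; simp
  | cons p t ih =>
    intro ps
    simp only [List.foldl_cons, List.reverse_cons]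
    rw [ih]
    cases h : t.reverse.find? (fun p => p.1 == "s") with
    | some x => simp [List.find?_append, h]
    | none =>
      simp only [List.find?_append, h, Option.none_or]
      unfold pvStep
      by_cases hs : p.1 = "s"
      · simp [hs]
      · simp [hs]

-- ===== VERDICT (by name: the statement is the Claim_ definition above) =====
theorem player_start_and_coal_counter_spec : Claim_equal_player_start_and_coal_counter := by
  intro m _
  unfold Spec_player_start_and_coal_counter player_start_and_coal_counter player_start_and_coal_counter_alt
  have hA : (PySem.List.pyRange 0 (m.length : Int) 1).foldl (fun st r =>
      (PySem.List.pyRange 0 ((PySem.List.pyGetD m r []).length : Int) 1).foldl (fun st2 c =>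
        if PySem.List.pyGetD (PySem.List.pyGetD m r []) c "" = "s" then (some (r, c), st2.2)
        else if PySem.List.pyGetD (PySem.List.pyGetD m r []) c "" = "c" then (st2.1, st2.2 + 1)
        else st2) st) ((none : Option (Int × Int)), (0 : Int))
    = (PySem.List.enumerate m 0).foldl
        (fun st rrow => (PySem.List.enumerate rrow.2 0).foldl (pvInnerA rrow.1) st)
        ((none : Option (Int × Int)), (0 : Int)) := by
    rw [PySem.List.enumerate_eq_map_pyRange (d := ([] : List String)), List.foldl_map]
    congr 1
    funext st r
    exact pvInnerA_eq r m st
  rw [hA, pvOuter_split, pvFoldl_keepLast]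
  cases h : ((PySem.List.enumerate m 0).flatMap (fun rrow => (PySem.List.enumerate rrow.2 0).map
      (fun ccell => ((ccell.2, (rrow.1, ccell.1)) : String × (Int × Int))))).reverse.find? (fun p => p.1 == "s") with
  | some x => simp [h]
  | none => simp [h]
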